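-- pv_equiv track=rewrite | github.com/drik-exe/magic_square_qt | encryption/backpack.py | create_k_i
-- ===== SOURCE A (Python) =====
-- def create_k_i(n: int = None):
--     if n == None:
--         n = 2
--     k_i = [n]
--     for i in range(1, 7):
--         m = k_i[i-1]
--         k_i.append(m * 2)
--     return k_i
-- ===== SOURCE B (Python) =====
-- def create_k_i(n: int = None):
--     if n == None:
--         n = 2
--     return [n << i for i in range(7)]
-- ===== Notes on version B (the rewrite author's own statement) =====
-- stated objective: simpler
-- what changed: B computes each element by its closed form n*2^i from the index instead of appending double of the previous list element.
import Mathlib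
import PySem

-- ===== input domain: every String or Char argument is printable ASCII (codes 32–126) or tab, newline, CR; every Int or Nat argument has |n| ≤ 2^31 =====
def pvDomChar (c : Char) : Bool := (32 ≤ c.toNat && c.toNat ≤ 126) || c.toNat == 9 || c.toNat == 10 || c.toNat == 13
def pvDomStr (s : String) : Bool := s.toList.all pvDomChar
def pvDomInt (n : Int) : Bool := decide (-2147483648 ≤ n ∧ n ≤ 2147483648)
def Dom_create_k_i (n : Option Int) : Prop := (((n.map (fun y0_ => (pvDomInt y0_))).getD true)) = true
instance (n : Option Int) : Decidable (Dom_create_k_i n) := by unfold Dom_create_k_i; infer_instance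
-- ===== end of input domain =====

-- B replaces A's read-previous-and-double recurrence with the closed form n*2^i per index (simpler).


-- ===== PORT A =====
-- Transliteration of A: start with [n], then for i in range(1,7) read k_i[i-1] and append its double.
def create_k_i (n : Option Int) : List Int :=
  let n0 : Int := n.getD 2
  (PySem.List.pyRange 1 7 1).foldl (fun k_i i =>
    let m := (PySem.List.pyGet? k_i (i-1)).getD 0  -- index always in range, so getD is exact here
    k_i ++ [m * 2]) [n0]

-- ===== PORT B =====
-- B: closed form n * 2^i per index (n << i in Python)
def create_k_i_alt (n : Option Int) : List Int :=
  let n0 : Int := n.getD 2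
  (PySem.List.pyRange 0 7 1).map (fun i => n0 * 2 ^ i.toNat)

-- ===== PRECONDITION & SPEC =====
def Spec_create_k_i (n : Option Int) (out : List Int) : Prop := out = create_k_i_alt n
instance (n : Option Int) (out : List Int) : Decidable (Spec_create_k_i n out) := by unfold Spec_create_k_i; infer_instance

-- ===== CLAIM (what is proved, stated in full; the proofs are below) =====
def Claim_equal_create_k_i : Prop := ∀ (n : Option Int), Dom_create_k_i n → Spec_create_k_i n (create_k_i n)

-- ===== LEMMAS AND PROOFS =====

-- ===== VERDICT (by name: the statement is the Claim_ definition above) =====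
theorem create_k_i_spec : Claim_equal_create_k_i := by
  intro n _
  unfold Spec_create_k_i create_k_i create_k_i_alt
  cases n <;> simp [PySem.List.pyRange, PySem.List.pyGet?, PySem.List.pyIdx?, List.range_succ] <;> norm_num <;> ring_nf <;> simp [and_self]
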